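-- pv_equiv track=rewrite | github.com/genesisdayrit/gen-intelligence | app/tests/test_todoist_completed.py | find_daily_review_end
-- ===== SOURCE A (Python) =====
-- def find_daily_review_end(content):
--     """Find the index after Daily Review's ending '---'.
--
--     Returns the character index right after the '---' line, or None if not found.
--     """
--     lines = content.split('\n')
--     in_daily_review = False
--     char_count = 0
--
--     for i, line in enumerate(lines):
--         if 'Daily Review:' in line:
--             in_daily_review = True
--
--         if in_daily_review and line.strip() == '---':
--             char_count += len(line) + 1
--             return char_count
--
--         char_count += len(line) + 1
--
--     return None
-- ===== SOURCE B (Python) =====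
-- def find_daily_review_end(content):
--     """Find the index after Daily Review's ending '---'.
--
--     Returns the character index right after the '---' line, or None if not found.
--     """
--     lines = content.split('\n')
--     start = None
--     for i, line in enumerate(lines):
--         if 'Daily Review:' in line:
--             start = i
--             break
--     if start is None:
--         return None
--     for j in range(start, len(lines)):
--         if lines[j].strip() == '---':
--             return len('\n'.join(lines[:j + 1])) + 1
--     return None
-- ===== Notes on version B (the rewrite author's own statement) =====
-- stated objective: alternative
-- what changed: Replaced the single pass that threads an in_daily_review flag and a running character counter through every line by two sequential scans (find the 'Daily Review:' line, then the first '---' line from there) with the return offset computed afterwards as len('\n'.join(lines[:j+1])) + 1.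
import Mathlib
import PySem

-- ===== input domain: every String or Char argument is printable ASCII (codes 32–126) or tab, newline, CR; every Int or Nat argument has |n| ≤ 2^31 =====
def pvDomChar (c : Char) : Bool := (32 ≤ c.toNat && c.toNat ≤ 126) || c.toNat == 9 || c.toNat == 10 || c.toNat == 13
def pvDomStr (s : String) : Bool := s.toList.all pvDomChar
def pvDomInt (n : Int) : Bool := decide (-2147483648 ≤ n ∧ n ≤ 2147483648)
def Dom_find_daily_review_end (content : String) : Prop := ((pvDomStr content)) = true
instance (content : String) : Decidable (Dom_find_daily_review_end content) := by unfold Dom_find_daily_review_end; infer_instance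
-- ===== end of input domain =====

-- B replaces A's flag-and-counter single pass by two sequential scans plus an
-- offset computed from '\n'.join; alternative decomposition, same cost.

-- shared line tests: 'Daily Review:' in line, and line.strip() == '---'
def pvHasDR (l : String) : Bool := PySem.Str.isIn "Daily Review:" l
def pvIsSep (l : String) : Bool := PySem.Str.strip l == "---"

-- ===== PORT A =====
-- the for-loop of A: state = (in_daily_review, char_count)
def pvAgo : List String → Bool → Int → Option Int
  | [], _, _ => none
  | line :: rest, indr, cc =>
    let indr' := indr || pvHasDR line
    if indr' && pvIsSep line then some (cc + PySem.Str.len line + 1)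
    else pvAgo rest indr' (cc + PySem.Str.len line + 1)

def find_daily_review_end (content : String) : Option Int :=
  let lines := (PySem.Str.split? content "\n").getD []   -- sep "\n" ≠ "": split? is always some
  pvAgo lines false 0

-- ===== PORT B =====
-- first loop of Source B: index of the first line containing 'Daily Review:'
def pvFindStart : List String → Nat → Option Nat
  | [], _ => none
  | l :: rest, i => if pvHasDR l then some i else pvFindStart rest (i + 1)

-- second loop of Source B: first j ≥ start with lines[j].strip() == '---'
def pvFindSep : List String → Nat → Option Nat
  | [], _ => none
  | l :: rest, j => if pvIsSep l then some j else pvFindSep rest (j + 1)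

def find_daily_review_end_alt (content : String) : Option Int :=
  let lines := (PySem.Str.split? content "\n").getD []
  match pvFindStart lines 0 with
  | none => none
  | some s =>
      (pvFindSep (lines.drop s) s).map
        (fun j => PySem.Str.len (PySem.Str.join "\n" (lines.take (j + 1))) + 1)

-- ===== PRECONDITION & SPEC =====
def Spec_find_daily_review_end (content : String) (out : Option Int) : Prop := out = find_daily_review_end_alt content
instance (content : String) (out : Option Int) : Decidable (Spec_find_daily_review_end content out) := by unfold Spec_find_daily_review_end; infer_instance

-- ===== CLAIM (what is proved, stated in full; the proofs are below) =====
def Claim_equal_find_daily_review_end : Prop := ∀ (content : String), Dom_find_daily_review_end content → Spec_find_daily_review_end content (find_daily_review_end content)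

-- ===== LEMMAS AND PROOFS =====

-- sum of len(line)+1 over a list of lines: A's char_count over a consumed prefix
def pvCsum (xs : List String) : Int := (xs.map (fun l => PySem.Str.len l + 1)).sum

theorem pvCsum_cons (x : List String) (l : String) :
    pvCsum (l :: x) = PySem.Str.len l + 1 + pvCsum x := by
  simp [pvCsum]

theorem pvFindSep_shift (ls : List String) : ∀ k,
    pvFindSep ls k = (pvFindSep ls 0).map (fun j => j + k) := by
  induction ls with
  | nil => intro k; rfl
  | cons l rest ih =>
    intro k
    simp only [pvFindSep]
    split_ifs with h
    · simp
    · rw [ih (k + 1), ih 1, Option.map_map]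
      cases pvFindSep rest 0 with
      | none => rfl
      | some j => simp; omega

theorem pvFindStart_shift (ls : List String) : ∀ k,
    pvFindStart ls k = (pvFindStart ls 0).map (fun j => j + k) := by
  induction ls with
  | nil => intro k; rfl
  | cons l rest ih =>
    intro k
    simp only [pvFindStart]
    split_ifs with h
    · simp
    · rw [ih (k + 1), ih 1, Option.map_map]
      cases pvFindStart rest 0 with
      | none => rfl
      | some j => simp; omega

-- A's loop once the flag is set: first '---' line, char_count of the prefix through it
theorem pvAgo_true (ls : List String) : ∀ cc,
    pvAgo ls true cc = (pvFindSep ls 0).map (fun j => cc + pvCsum (ls.take (j + 1))) := by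
  induction ls with
  | nil => intro cc; rfl
  | cons l rest ih =>
    intro cc
    simp only [pvAgo, pvFindSep, Bool.true_or, Bool.true_and]
    split_ifs with h
    · simp [pvCsum]; ring
    · rw [ih, pvFindSep_shift rest 1, Option.map_map]
      cases pvFindSep rest 0 with
      | none => rfl
      | some j =>
        simp only [Option.map_some, Option.some.injEq, Function.comp_apply]
        rw [List.take_succ_cons, pvCsum_cons]
        ring

-- A's loop before the flag is set, versus B's two scans (with B's offset as pvCsum)
theorem pvAgo_false (ls : List String) : ∀ cc,
    pvAgo ls false cc =
      match pvFindStart ls 0 with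
      | none => none
      | some s => (pvFindSep (ls.drop s) 0).map (fun j => cc + pvCsum (ls.take (s + j + 1))) := by
  induction ls with
  | nil => intro cc; rfl
  | cons l rest ih =>
    intro cc
    by_cases hd : pvHasDR l = true
    · have step : pvAgo (l :: rest) false cc = pvAgo (l :: rest) true cc := by
        simp [pvAgo, hd]
      rw [step, pvAgo_true]
      simp [pvFindStart, hd]
    · simp only [pvAgo, hd, Bool.or_false, Bool.false_and, Bool.false_eq_true, if_false,
        pvFindStart]
      rw [ih, pvFindStart_shift rest 1]
      cases pvFindStart rest 0 with
      | none => rfl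
      | some s =>
        simp only [Option.map_some]
        have hdrop : (l :: rest).drop (s + 1) = rest.drop s := by simp
        rw [hdrop]
        cases pvFindSep (rest.drop s) 0 with
        | none => rfl
        | some j =>
          simp only [Option.map_some, Option.some.injEq]
          have htake : (l :: rest).take (s + 1 + j + 1) = l :: rest.take (s + j + 1) := by
            have : s + 1 + j + 1 = (s + j + 1) + 1 := by omega
            rw [this, List.take_succ_cons]
          rw [htake, pvCsum_cons]
          ring

-- len('\n'.join(xs)) + 1 = Σ (len(x)+1) for nonempty xs
theorem pvJoinLen : ∀ (xs : List String), xs ≠ [] →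
    PySem.Str.len (PySem.Str.join "\n" xs) + 1 = pvCsum xs := by
  intro xs
  induction xs with
  | nil => intro h; exact absurd rfl h
  | cons x rest ih =>
    intro _
    cases rest with
    | nil =>
      simp [PySem.Str.len_eq, PySem.Str.toList_join, PySem.Chars.join_singleton, pvCsum]
    | cons y t =>
      have ihr := ih (by simp)
      rw [pvCsum_cons, ← ihr]
      simp only [PySem.Str.len_eq, PySem.Str.toList_join, List.map_cons] at *
      rw [PySem.Chars.join_cons_cons]
      simp only [List.length_append]
      have h1 : ("\n" : String).toList.length = 1 := by decide
      rw [h1]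
      push_cast
      ring

-- the whole claim, over the shared list of lines
theorem pvMain (lines : List String) :
    pvAgo lines false 0 =
      match pvFindStart lines 0 with
      | none => none
      | some s =>
          (pvFindSep (lines.drop s) s).map
            (fun j => PySem.Str.len (PySem.Str.join "\n" (lines.take (j + 1))) + 1) := by
  rw [pvAgo_false]
  cases hs : pvFindStart lines 0 with
  | none => rfl
  | some s =>
    simp only
    rw [pvFindSep_shift (lines.drop s) s]
    cases pvFindSep (lines.drop s) 0 with
    | none => rfl
    | some j =>
      simp only [Option.map_some, Option.some.injEq]
      have hne : lines.take (j + s + 1) ≠ [] := by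
        cases hlines : lines with
        | nil => rw [hlines] at hs; exact absurd hs (by simp [pvFindStart])
        | cons a t => simp [List.take_succ_cons]
      rw [pvJoinLen (lines.take (j + s + 1)) hne]
      have harith : s + j + 1 = j + s + 1 := by omega
      rw [harith]
      ring

-- ===== VERDICT (by name: the statement is the Claim_ definition above) =====
theorem find_daily_review_end_spec : Claim_equal_find_daily_review_end := by
  intro content _
  unfold Spec_find_daily_review_end find_daily_review_end find_daily_review_end_alt
  exact pvMain ((PySem.Str.split? content "\n").getD [])
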